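-- pv_equiv track=rewrite | github.com/SunPower/PVMismatch | pvmismatch/pvmismatch_lib/pvconstants.py | get_series_cells
-- ===== SOURCE A (Python) =====
-- def get_series_cells(cell_pos_column, prev_col=None):
--     """
--     Get the sequence of series cells between parallel crossties.
--
--     :param cell_pos_column: column in cell position pattern
--     :param prev_col: previous column in cell position pattern
--     :return: indices of series cells
--     """
--     series_cells = []  # empty list of indices of cells in series
--     # if the previous column is specified, find the indices of cells in the
--     # current column that correspond to cells between parallel crossties in the
--     # previous column
--     if prev_col:
--         cell_pos_column = zip(prev_col, cell_pos_column)
--     for cell in cell_pos_column: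
--         if prev_col:
--             cell, next_col = cell
--         else:
--             next_col = None
--         # noinspection PyTypeChecker
--         if cell['crosstie'] == True:
--             yield series_cells
--             series_cells = []
--         # if the next column is specified, return the cell indices that
--         # correspond to the previous column since they must be the same
--         if next_col:
--             cell_idx = next_col['idx']
--         else:
--             # noinspection PyTypeChecker
--             cell_idx = cell['idx']
--         series_cells.append(cell_idx)
--     yield series_cells
-- ===== SOURCE B (Python) =====
-- def get_series_cells(cell_pos_column, prev_col=None):
--     """Cut-point reformulation: compute the crosstie positions first, then
--     slice the idx list between consecutive cut points."""
--     if prev_col: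
--         pairs = list(zip(prev_col, cell_pos_column))
--         idxs = [(nxt['idx'] if nxt else cell['idx']) for cell, nxt in pairs]
--         flags = [cell['crosstie'] == True for cell, _ in pairs]
--     else:
--         cells = list(cell_pos_column)
--         idxs = [cell['idx'] for cell in cells]
--         flags = [cell['crosstie'] == True for cell in cells]
--     cuts = [0] + [i for i, f in enumerate(flags) if f] + [len(idxs)]
--     for start, stop in zip(cuts, cuts[1:]):
--         yield idxs[start:stop]
-- ===== Notes on version B (the rewrite author's own statement) =====
-- stated objective: alternative
-- what changed: A accumulates groups in one yield-on-crosstie loop; B computes the list of crosstie cut positions first and then yields slices of the idx list between consecutive cut points (no accumulator).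
import Mathlib
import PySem

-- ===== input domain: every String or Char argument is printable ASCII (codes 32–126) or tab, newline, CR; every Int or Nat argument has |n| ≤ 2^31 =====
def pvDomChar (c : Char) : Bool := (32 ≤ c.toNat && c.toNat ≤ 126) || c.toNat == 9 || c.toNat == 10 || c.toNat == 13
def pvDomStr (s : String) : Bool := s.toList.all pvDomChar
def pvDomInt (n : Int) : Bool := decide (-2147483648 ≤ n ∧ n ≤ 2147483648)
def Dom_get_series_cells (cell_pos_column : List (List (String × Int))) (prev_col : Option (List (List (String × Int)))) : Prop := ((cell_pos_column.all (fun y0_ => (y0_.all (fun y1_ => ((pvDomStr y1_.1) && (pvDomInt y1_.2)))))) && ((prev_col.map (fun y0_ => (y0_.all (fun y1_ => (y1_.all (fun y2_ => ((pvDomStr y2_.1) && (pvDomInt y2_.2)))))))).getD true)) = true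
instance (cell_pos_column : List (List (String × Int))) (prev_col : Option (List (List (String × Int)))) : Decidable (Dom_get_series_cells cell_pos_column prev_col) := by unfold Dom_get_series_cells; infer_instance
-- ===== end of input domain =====

-- B replaces A's accumulate-and-yield loop by a cut-point algorithm: it precomputes the crosstie
-- positions and then slices the idx list between consecutive cut points (objective: alternative).
-- Both Pythons are generators; the equivalence is about the list of yielded groups.

-- shared Python-dict lookup: dict(pairs) built from the assoc list, then d[k]; 0 is never read inside Pre_
def pvLook (d : List (String × Int)) (k : String) : Int :=
  (PySem.Dict.ofList d).getD k 0

-- ===== PORT A =====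
-- the loop of A when prev_col is falsy: cell gives both the crosstie flag and the idx
def pvLoopSingle : List (List (String × Int)) → List Int → List (List Int)
  | [], series => [series]
  | c :: rest, series =>
    if pvLook c "crosstie" = 1 then
      series :: pvLoopSingle rest [pvLook c "idx"]
    else
      pvLoopSingle rest (series ++ [pvLook c "idx"])

-- the loop of A when prev_col is truthy: iterate zip(prev_col, cell_pos_column)
def pvLoopPair : List ((List (String × Int)) × (List (String × Int))) → List Int → List (List Int)
  | [], series => [series]
  | (c, n) :: rest, series =>
    let idx := if n ≠ [] then pvLook n "idx" else pvLook c "idx"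
    if pvLook c "crosstie" = 1 then
      series :: pvLoopPair rest [idx]
    else
      pvLoopPair rest (series ++ [idx])

def get_series_cells (cell_pos_column : List (List (String × Int))) (prev_col : Option (List (List (String × Int)))) : List (List Int) :=
  match prev_col with
  | some l => if l ≠ [] then pvLoopPair (l.zip cell_pos_column) [] else pvLoopSingle cell_pos_column []
  | none => pvLoopSingle cell_pos_column []

-- ===== PORT B =====
-- B, step 1: the idx list and the crosstie-flag list
def pvIdxsFlags (cell_pos_column : List (List (String × Int))) (prev_col : Option (List (List (String × Int)))) : List Int × List Bool :=
  match prev_col with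
  | some l =>
    if l ≠ [] then
      let pairs := l.zip cell_pos_column
      (pairs.map (fun p => if p.2 ≠ [] then pvLook p.2 "idx" else pvLook p.1 "idx"),
       pairs.map (fun p => pvLook p.1 "crosstie" == 1))
    else
      (cell_pos_column.map (fun c => pvLook c "idx"),
       cell_pos_column.map (fun c => pvLook c "crosstie" == 1))
  | none =>
    (cell_pos_column.map (fun c => pvLook c "idx"),
     cell_pos_column.map (fun c => pvLook c "crosstie" == 1))

-- B, step 2: cuts = [0] + [i for i, f in enumerate(flags) if f] + [len(idxs)], then slice between
-- consecutive cut points: [idxs[a:b] for a, b in zip(cuts, cuts[1:])]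
def get_series_cells_alt (cell_pos_column : List (List (String × Int))) (prev_col : Option (List (List (String × Int)))) : List (List Int) :=
  let idxs := (pvIdxsFlags cell_pos_column prev_col).1
  let flags := (pvIdxsFlags cell_pos_column prev_col).2
  let cuts : List Int :=
    0 :: ((PySem.List.enumerate flags 0).filter (fun p => p.2)).map (fun p => p.1) ++ [(idxs.length : Int)]
  (cuts.zip cuts.tail).map (fun p => PySem.List.slice idxs (some p.1) (some p.2))

-- ===== PRECONDITION & SPEC =====
-- every consumed dict has the keys A reads ('crosstie' on the flag dict, 'idx' on whichever dict is read)
def pvCellOK (c : List (String × Int)) : Prop :=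
  (PySem.Dict.ofList c).contains "crosstie" = true ∧ (PySem.Dict.ofList c).contains "idx" = true
def pvPairOK (c n : List (String × Int)) : Prop :=
  (PySem.Dict.ofList c).contains "crosstie" = true ∧
    (if n ≠ [] then (PySem.Dict.ofList n).contains "idx" = true
     else (PySem.Dict.ofList c).contains "idx" = true)
-- Pre_ excludes exactly the inputs where A raises KeyError (a consumed dict missing 'crosstie' or the read 'idx')
def Pre_get_series_cells (cell_pos_column : List (List (String × Int))) (prev_col : Option (List (List (String × Int)))) : Prop :=
  ((prev_col.getD []) = [] → ∀ c ∈ cell_pos_column, pvCellOK c) ∧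
  ((prev_col.getD []) ≠ [] → ∀ p ∈ (prev_col.getD []).zip cell_pos_column, pvPairOK p.1 p.2)
instance (cell_pos_column : List (List (String × Int))) (prev_col : Option (List (List (String × Int)))) : Decidable (Pre_get_series_cells cell_pos_column prev_col) := by
  unfold Pre_get_series_cells pvCellOK pvPairOK; infer_instance
def pvWitness_get_series_cells : (List (List (String × Int))) × (Option (List (List (String × Int)))) :=
  ([[("crosstie", 1), ("idx", 3)], [("crosstie", 0), ("idx", 4)]], none)
def Spec_get_series_cells (cell_pos_column : List (List (String × Int))) (prev_col : Option (List (List (String × Int)))) (out : List (List Int)) : Prop := out = get_series_cells_alt cell_pos_column prev_col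
instance (cell_pos_column : List (List (String × Int))) (prev_col : Option (List (List (String × Int)))) (out : List (List Int)) : Decidable (Spec_get_series_cells cell_pos_column prev_col out) := by unfold Spec_get_series_cells; infer_instance

-- ===== CLAIM (what is proved, stated in full; the proofs are below) =====
def Claim_equal_get_series_cells : Prop := ∀ (cell_pos_column : List (List (String × Int))) (prev_col : Option (List (List (String × Int)))), Dom_get_series_cells cell_pos_column prev_col → Pre_get_series_cells cell_pos_column prev_col → Spec_get_series_cells cell_pos_column prev_col (get_series_cells cell_pos_column prev_col)

-- ===== LEMMAS AND PROOFS =====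
-- proof-layer view of A's loop over normalized (idx, crosstie) records
def pvGroup : List (Int × Bool) → List Int → List (List Int)
  | [], group => [group]
  | (idx, ct) :: rest, group =>
    if ct then group :: pvGroup rest [idx] else pvGroup rest (group ++ [idx])

-- proof-layer, Nat-level cut positions and slicing
def posN : Nat → List Bool → List Nat
  | _, [] => []
  | s, f :: r => (if f then [s] else []) ++ posN (s + 1) r

def slicesN (idxs : List Int) (cuts : List Nat) : List (List Int) :=
  (cuts.zip cuts.tail).map (fun p => (idxs.drop p.1).take (p.2 - p.1))

theorem pvLoopSingle_eq (cs : List (List (String × Int))) (g : List Int) :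
    pvLoopSingle cs g = pvGroup (cs.map (fun c => (pvLook c "idx", pvLook c "crosstie" == 1))) g := by
  induction cs generalizing g with
  | nil => rfl
  | cons c rest ih =>
    simp only [pvLoopSingle, List.map, pvGroup]
    by_cases h : pvLook c "crosstie" = 1 <;> simp [h, ih]

theorem pvLoopPair_eq (ps : List ((List (String × Int)) × (List (String × Int)))) (g : List Int) :
    pvLoopPair ps g = pvGroup (ps.map (fun p =>
      ((if p.2 ≠ [] then pvLook p.2 "idx" else pvLook p.1 "idx"), pvLook p.1 "crosstie" == 1))) g := by
  induction ps generalizing g with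
  | nil => rfl
  | cons p rest ih =>
    obtain ⟨c, n⟩ := p
    simp only [pvLoopPair, List.map, pvGroup]
    by_cases h : pvLook c "crosstie" = 1 <;> simp [h, ih]

theorem posN_shift (fl : List Bool) (s k : Nat) :
    posN (s + k) fl = (posN s fl).map (fun n => n + k) := by
  induction fl generalizing s with
  | nil => rfl
  | cons f r ih =>
    simp only [posN, List.map_append]
    rw [show s + k + 1 = (s + 1) + k by omega, ih]
    cases f <;> simp

theorem slicesN_shift (idxs pre : List Int) (cuts : List Nat) :
    slicesN (pre ++ idxs) (cuts.map (fun n => n + pre.length)) = slicesN idxs cuts := by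
  unfold slicesN
  rw [← List.map_tail, List.zip_map, List.map_map]
  apply List.map_congr_left
  intro p _
  simp only [Function.comp_apply, Prod.map_fst, Prod.map_snd]
  rw [Nat.add_comm p.1 pre.length, List.drop_length_add_append]
  congr 1
  omega

theorem slicesN_cons₂ (idxs : List Int) (a b : Nat) (cs : List Nat) :
    slicesN idxs (a :: b :: cs) = (idxs.drop a).take (b - a) :: slicesN idxs (b :: cs) := rfl

theorem pvGroup_eq_slicesN (recs : List (Int × Bool)) (pre : List Int) :
    pvGroup recs pre =
      slicesN (pre ++ recs.map Prod.fst)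
        (0 :: posN pre.length (recs.map Prod.snd) ++ [pre.length + recs.length]) := by
  induction recs generalizing pre with
  | nil =>
    simp [pvGroup, slicesN, posN]
  | cons r rest ih =>
    obtain ⟨idx, ct⟩ := r
    cases ct with
    | false =>
      simp only [pvGroup, Bool.false_eq_true, if_false]
      rw [ih (pre ++ [idx])]
      simp only [List.map_cons, posN, Bool.false_eq_true, if_false, List.nil_append,
        List.length_append, List.length_cons, List.length_map, List.length_nil,
        List.append_assoc, List.cons_append, List.singleton_append, Nat.zero_add]
      rw [show pre.length + 1 + rest.length = pre.length + (rest.length + 1) by omega]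
    | true =>
      simp only [pvGroup, if_true]
      rw [ih [idx]]
      simp only [List.map_cons, posN, if_true, List.singleton_append, List.length_cons,
        List.length_map, List.length_append, List.length_nil, Nat.zero_add, List.cons_append,
        List.nil_append]
      rw [slicesN_cons₂]
      have h1 : ((pre ++ idx :: rest.map Prod.fst).drop 0).take (pre.length - 0) = pre := by
        simpa using List.take_left (l₁ := pre) (l₂ := idx :: rest.map Prod.fst)
      have hp : posN (pre.length + 1) (rest.map Prod.snd)
          = (posN 1 (rest.map Prod.snd)).map (fun n => n + pre.length) := by
        rw [Nat.add_comm]; exact posN_shift _ 1 pre.length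
      have h2 : (pre.length :: (posN (pre.length + 1) (rest.map Prod.snd) ++
            [pre.length + (rest.length + 1)]) : List Nat)
          = (0 :: (posN 1 (rest.map Prod.snd) ++ [1 + rest.length])).map
              (fun n => n + pre.length) := by
        rw [hp]
        simp only [List.map_cons, List.map_append, List.map_nil, Nat.zero_add]
        rw [show 1 + rest.length + pre.length = pre.length + (rest.length + 1) by omega]
      rw [h1, h2]
      rw [show (pre ++ idx :: rest.map Prod.fst) = pre ++ ([idx] ++ rest.map Prod.fst) by simp]
      rw [slicesN_shift]
      simp

theorem posF_eq (fl : List Bool) (s : Nat) :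
    ((PySem.List.enumerate fl (s : Int)).filter (fun p => p.2)).map (fun p => p.1)
      = (posN s fl).map (fun n : Nat => (n : Int)) := by
  induction fl generalizing s with
  | nil => rfl
  | cons f r ih =>
    rw [PySem.List.enumerate_cons, show ((s : Int) + 1) = ((s + 1 : Nat) : Int) by push_cast; ring]
    cases f with
    | false =>
      rw [List.filter_cons_of_neg (by simp), ih]
      simp [posN]
    | true =>
      rw [List.filter_cons_of_pos (by simp), List.map_cons, ih]
      simp [posN]

theorem slicesInt_eq (idxs : List Int) (nc : List Nat) :
    ((nc.map (fun n : Nat => (n : Int))).zip ((nc.map (fun n : Nat => (n : Int))).tail)).map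
        (fun p => PySem.List.slice idxs (some p.1) (some p.2))
      = slicesN idxs nc := by
  induction nc with
  | nil => rfl
  | cons a t ih =>
    cases t with
    | nil => rfl
    | cons b cs =>
      simp only [List.map_cons, List.tail_cons, List.zip_cons_cons]
      rw [slicesN_cons₂, ← ih, PySem.List.slice_natCast]
      simp only [List.map_cons, List.tail_cons]

-- ===== VERDICT (by name: the statement is the Claim_ definition above) =====
theorem get_series_cells_spec : Claim_equal_get_series_cells := by
  intro cpc prev _ _
  unfold Spec_get_series_cells get_series_cells get_series_cells_alt pvIdxsFlags
  have main : ∀ (idxf : List Int) (flf : List Bool) (recs : List (Int × Bool)),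
      recs.map Prod.fst = idxf → recs.map Prod.snd = flf →
      pvGroup recs [] =
        ((0 :: ((PySem.List.enumerate flf (0 : Int)).filter (fun p => p.2)).map (fun p => p.1)
            ++ [(idxf.length : Int)]).zip
          ((0 :: ((PySem.List.enumerate flf (0 : Int)).filter (fun p => p.2)).map (fun p => p.1)
            ++ [(idxf.length : Int)]).tail)).map
          (fun p => PySem.List.slice idxf (some p.1) (some p.2)) := by
    intro idxf flf recs hi hf
    have hlen : recs.length = idxf.length := by rw [← hi, List.length_map]
    have hcast : (0 :: ((PySem.List.enumerate flf (0 : Int)).filter (fun p => p.2)).map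
          (fun p => p.1) ++ [(idxf.length : Int)])
        = (0 :: posN 0 flf ++ [idxf.length]).map (fun n : Nat => (n : Int)) := by
      rw [show ((0 : Int)) = ((0 : Nat) : Int) by rfl, posF_eq flf 0]
      simp
    rw [hcast, slicesInt_eq]
    have := pvGroup_eq_slicesN recs []
    simpa [hi, hf, hlen] using this
  match prev with
  | none =>
    rw [pvLoopSingle_eq]
    exact main _ _ _ (by simp [List.map_map]) (by simp [List.map_map])
  | some l =>
    by_cases h : l = []
    · simp only [h, ne_eq, not_true_eq_false, if_false]
      rw [pvLoopSingle_eq]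
      exact main _ _ _ (by simp [List.map_map]) (by simp [List.map_map])
    · simp only [ne_eq, h, not_false_eq_true, if_true]
      rw [pvLoopPair_eq]
      exact main _ _ _ (by simp [List.map_map]) (by simp [List.map_map])
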